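-- pv_equiv track=rewrite | github.com/JuanAira/tp_ia_2023_RushHour | entrega2.py | posibles_coordenadas_por_forma
-- ===== SOURCE A (Python) =====
-- def posibles_coordenadas_por_forma(forma, pisos_range, filas_range, columnas_range, filas, columnas):
--     posibles_coordenadas = []
--
--     for piso in pisos_range:
--         for fila in filas_range:
--             for columna in columnas_range:
--
--                 if forma == ".":
--                     posibles_coordenadas.append((piso, fila, columna))
--
--                 elif forma == "L":
--                     if columna + 1 < columnas and fila + 1 < filas:
--                         posibles_coordenadas.append((piso, fila, columna))
--
--                 elif forma == "T":
--                     if columna + 2 < columnas and fila + 1 < filas: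
--                         posibles_coordenadas.append((piso, fila, columna))
--
--                 elif forma == "O":
--                     if columna + 1 < columnas and fila + 1 < filas:
--                         posibles_coordenadas.append((piso, fila, columna))
--
--                 elif forma == "I":
--                     if fila + 2 < columnas:
--                         posibles_coordenadas.append((piso, fila, columna))
--
--                 elif forma == "-":
--                     if columna + 2 < columnas:
--                         posibles_coordenadas.append((piso, fila, columna))
--
--                 elif forma == "Z":
--                     if columna + 2 < columnas and fila + 1 < filas:
--                         posibles_coordenadas.append((piso, fila, columna))
--
--     return posibles_coordenadas
-- ===== SOURCE B (Python) =====
-- def posibles_coordenadas_por_forma(forma, pisos_range, filas_range, columnas_range, filas, columnas):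
--     # Phase 1: map the shape to its admissibility predicate on (fila, columna).
--     if forma == ".":
--         ok = lambda f, c: True
--     elif forma == "L" or forma == "O":
--         ok = lambda f, c: c + 1 < columnas and f + 1 < filas
--     elif forma == "T" or forma == "Z":
--         ok = lambda f, c: c + 2 < columnas and f + 1 < filas
--     elif forma == "I":
--         ok = lambda f, c: f + 2 < columnas
--     elif forma == "-":
--         ok = lambda f, c: c + 2 < columnas
--     else:
--         return []
--     pares = [(f, c) for f in filas_range for c in columnas_range if ok(f, c)]
--     # Phase 2: cross the floors with the precomputed pairs.
--     return [(p, f, c) for p in pisos_range for (f, c) in pares]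
-- ===== Notes on version B (the rewrite author's own statement) =====
-- stated objective: faster
-- what changed: B is two-phase: it resolves the shape to a predicate once, precomputes the valid (fila, columna) pairs in one pass over filas_range x columnas_range, then crosses pisos_range with that list, instead of re-testing the shape string and the bounds inside a triple nested loop.
import Mathlib
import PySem

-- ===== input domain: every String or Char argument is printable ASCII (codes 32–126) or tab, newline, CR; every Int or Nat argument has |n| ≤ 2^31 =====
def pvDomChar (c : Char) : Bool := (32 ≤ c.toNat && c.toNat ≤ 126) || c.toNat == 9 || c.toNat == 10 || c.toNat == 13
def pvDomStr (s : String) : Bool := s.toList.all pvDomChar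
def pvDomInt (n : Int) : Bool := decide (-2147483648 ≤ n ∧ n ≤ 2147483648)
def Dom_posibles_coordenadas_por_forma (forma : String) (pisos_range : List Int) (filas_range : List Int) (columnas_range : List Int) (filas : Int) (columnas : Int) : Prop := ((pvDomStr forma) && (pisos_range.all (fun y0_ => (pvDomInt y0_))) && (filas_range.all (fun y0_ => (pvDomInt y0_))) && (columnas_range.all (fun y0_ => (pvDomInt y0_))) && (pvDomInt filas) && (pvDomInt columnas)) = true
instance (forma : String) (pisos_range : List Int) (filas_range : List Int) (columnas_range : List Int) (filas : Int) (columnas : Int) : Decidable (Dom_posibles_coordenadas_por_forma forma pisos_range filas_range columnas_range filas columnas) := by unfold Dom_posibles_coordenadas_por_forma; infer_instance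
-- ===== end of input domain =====

-- B resolves the shape to a predicate once, precomputes the valid (fila, columna) pairs
-- in one pass, then crosses pisos_range with that list (two-phase instead of triple loop).
-- ===== PORT A =====
def posibles_coordenadas_por_forma (forma : String) (pisos_range : List Int) (filas_range : List Int) (columnas_range : List Int) (filas : Int) (columnas : Int) : List (Int × Int × Int) :=
  pisos_range.foldl (fun acc piso =>
    filas_range.foldl (fun acc fila =>
      columnas_range.foldl (fun acc columna =>
        if forma = "." then acc ++ [(piso, fila, columna)]
        else if forma = "L" then
          (if columna + 1 < columnas ∧ fila + 1 < filas then acc ++ [(piso, fila, columna)] else acc)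
        else if forma = "T" then
          (if columna + 2 < columnas ∧ fila + 1 < filas then acc ++ [(piso, fila, columna)] else acc)
        else if forma = "O" then
          (if columna + 1 < columnas ∧ fila + 1 < filas then acc ++ [(piso, fila, columna)] else acc)
        else if forma = "I" then
          (if fila + 2 < columnas then acc ++ [(piso, fila, columna)] else acc)
        else if forma = "-" then
          (if columna + 2 < columnas then acc ++ [(piso, fila, columna)] else acc)
        else if forma = "Z" then
          (if columna + 2 < columnas ∧ fila + 1 < filas then acc ++ [(piso, fila, columna)] else acc)
        else acc) acc) acc) []

-- ===== PORT B =====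
def posibles_coordenadas_por_forma_alt (forma : String) (pisos_range : List Int) (filas_range : List Int) (columnas_range : List Int) (filas : Int) (columnas : Int) : List (Int × Int × Int) :=
  let ok? : Option (Int → Int → Bool) :=
    if forma = "." then some (fun _ _ => true)
    else if forma = "L" ∨ forma = "O" then some (fun f c => decide (c + 1 < columnas ∧ f + 1 < filas))
    else if forma = "T" ∨ forma = "Z" then some (fun f c => decide (c + 2 < columnas ∧ f + 1 < filas))
    else if forma = "I" then some (fun f _ => decide (f + 2 < columnas))
    else if forma = "-" then some (fun _ c => decide (c + 2 < columnas))
    else none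
  match ok? with
  | none => []
  | some ok =>
    let pares : List (Int × Int) :=
      filas_range.flatMap (fun f => (columnas_range.filter (fun c => ok f c)).map (fun c => (f, c)))
    pisos_range.flatMap (fun p => pares.map (fun fc => (p, fc.1, fc.2)))

-- ===== PRECONDITION & SPEC =====
def Spec_posibles_coordenadas_por_forma (forma : String) (pisos_range : List Int) (filas_range : List Int) (columnas_range : List Int) (filas : Int) (columnas : Int) (out : List (Int × Int × Int)) : Prop := out = posibles_coordenadas_por_forma_alt forma pisos_range filas_range columnas_range filas columnas
instance (forma : String) (pisos_range : List Int) (filas_range : List Int) (columnas_range : List Int) (filas : Int) (columnas : Int) (out : List (Int × Int × Int)) : Decidable (Spec_posibles_coordenadas_por_forma forma pisos_range filas_range columnas_range filas columnas out) := by unfold Spec_posibles_coordenadas_por_forma; infer_instance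

-- ===== CLAIM (what is proved, stated in full; the proofs are below) =====
def Claim_equal_posibles_coordenadas_por_forma : Prop := ∀ (forma : String) (pisos_range : List Int) (filas_range : List Int) (columnas_range : List Int) (filas : Int) (columnas : Int), Dom_posibles_coordenadas_por_forma forma pisos_range filas_range columnas_range filas columnas → Spec_posibles_coordenadas_por_forma forma pisos_range filas_range columnas_range filas columnas (posibles_coordenadas_por_forma forma pisos_range filas_range columnas_range filas columnas)

-- ===== LEMMAS AND PROOFS =====

-- A's triple foldl with a conditional append equals the two-phase flatMap form of B.
theorem tripleLoop_eq (ok : Int → Int → Bool) (ps fs cs : List Int) :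
    ps.foldl (fun acc piso =>
      fs.foldl (fun acc fila =>
        cs.foldl (fun acc columna =>
          if ok fila columna then acc ++ [(piso, fila, columna)] else acc) acc) acc) ([] : List (Int × Int × Int))
    = ps.flatMap (fun p =>
        (fs.flatMap (fun f => (cs.filter (fun c => ok f c)).map (fun c => (f, c)))).map
          (fun fc => (p, fc.1, fc.2))) := by
  have inner : ∀ (p f : Int) (acc : List (Int × Int × Int)),
      cs.foldl (fun acc columna => if ok f columna then acc ++ [(p, f, columna)] else acc) acc
      = acc ++ (cs.filter (fun c => ok f c)).map (fun c => (p, f, c)) := by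
    intro p f acc
    exact PySem.List.foldl_append_if (fun c => ok f c) (fun c => (p, f, c)) cs acc
  have mid : ∀ (p : Int) (acc : List (Int × Int × Int)),
      fs.foldl (fun acc fila =>
        cs.foldl (fun acc columna => if ok fila columna then acc ++ [(p, fila, columna)] else acc) acc) acc
      = acc ++ fs.flatMap (fun f => (cs.filter (fun c => ok f c)).map (fun c => (p, f, c))) := by
    intro p acc
    have := PySem.List.foldl_append_eq_flatMap
      (fun f => (cs.filter (fun c => ok f c)).map (fun c => (p, f, c))) fs acc
    rw [← this]
    exact List.foldl_ext _ _ _ (fun acc f _ => inner p f acc)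
  have outer :
      ps.foldl (fun acc piso =>
        fs.foldl (fun acc fila =>
          cs.foldl (fun acc columna => if ok fila columna then acc ++ [(piso, fila, columna)] else acc) acc) acc)
        ([] : List (Int × Int × Int))
      = [] ++ ps.flatMap (fun p => fs.flatMap (fun f => (cs.filter (fun c => ok f c)).map (fun c => (p, f, c)))) := by
    have := PySem.List.foldl_append_eq_flatMap
      (fun p => fs.flatMap (fun f => (cs.filter (fun c => ok f c)).map (fun c => (p, f, c)))) ps
      ([] : List (Int × Int × Int))
    rw [← this]
    exact List.foldl_ext _ _ _ (fun acc p _ => mid p acc)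
  rw [outer]
  simp [List.map_flatMap, List.map_map, Function.comp_def]

-- ===== VERDICT (by name: the statement is the Claim_ definition above) =====
theorem posibles_coordenadas_por_forma_spec : Claim_equal_posibles_coordenadas_por_forma := by
  intro forma ps fs cs filas columnas _
  unfold Spec_posibles_coordenadas_por_forma posibles_coordenadas_por_forma posibles_coordenadas_por_forma_alt
  by_cases h1 : forma = "."
  · simp only [h1, reduceIte]
    simpa using tripleLoop_eq (fun _ _ => true) ps fs cs
  by_cases h2 : forma = "L"
  · simp only [h2, reduceIte, true_or]
    simpa using tripleLoop_eq (fun f c => decide (c + 1 < columnas ∧ f + 1 < filas)) ps fs cs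
  by_cases h3 : forma = "T"
  · simp only [h3, reduceIte, true_or]
    simpa using tripleLoop_eq (fun f c => decide (c + 2 < columnas ∧ f + 1 < filas)) ps fs cs
  by_cases h4 : forma = "O"
  · simp only [h4, reduceIte, or_true]
    simpa using tripleLoop_eq (fun f c => decide (c + 1 < columnas ∧ f + 1 < filas)) ps fs cs
  by_cases h5 : forma = "I"
  · simp only [h5, reduceIte]
    simpa using tripleLoop_eq (fun f c => decide (f + 2 < columnas)) ps fs cs
  by_cases h6 : forma = "-"
  · simp only [h6, reduceIte]
    simpa using tripleLoop_eq (fun f c => decide (c + 2 < columnas)) ps fs cs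
  by_cases h7 : forma = "Z"
  · simp only [h7, reduceIte, or_true]
    simpa using tripleLoop_eq (fun f c => decide (c + 2 < columnas ∧ f + 1 < filas)) ps fs cs
  · -- unknown shape: A appends nothing, B returns []
    simp only [h1, h2, h3, h4, h5, h6, h7, reduceIte]
    have stay : ∀ (l : List Int) (acc : List (Int × Int × Int)),
        l.foldl (fun acc _ => acc) acc = acc := by
      intro l; induction l with
      | nil => intro acc; rfl
      | cons x xs ih2 => intro acc; simp [List.foldl_cons, ih2 acc]
    have mid : ∀ (acc : List (Int × Int × Int)),
        fs.foldl (fun acc _ => cs.foldl (fun acc _ => acc) acc) acc = acc := by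
      intro acc
      calc fs.foldl (fun acc _ => cs.foldl (fun acc _ => acc) acc) acc
          = fs.foldl (fun acc _ => acc) acc :=
            List.foldl_ext _ _ _ (fun acc f _ => stay cs acc)
        _ = acc := stay fs acc
    calc ps.foldl (fun acc _ => fs.foldl (fun acc _ => cs.foldl (fun acc _ => acc) acc) acc) ([] : List (Int × Int × Int))
        = ps.foldl (fun acc _ => acc) [] := List.foldl_ext _ _ _ (fun acc p _ => mid acc)
      _ = [] := stay ps []
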